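-- pv_equiv track=rewrite | github.com/PLDrago/WDED | discretizer.py | get_partition_keys
-- ===== SOURCE A (Python) =====
-- def get_partition_keys(X, selected_cuts):
--     result = []
--     for row in X:
--         key = []
--         for attr in [0, 1]:
--             cuts = selected_cuts[attr]
--             val = row[attr]
--             for i, cut in enumerate(cuts):
--                 if val <= cut:
--                     key.append(i)
--                     break
--             else:
--                 key.append(len(cuts))
--         result.append(tuple(key))
--     return result
-- ===== SOURCE B (Python) =====
-- def _bisect_ge(vals, v):
--     # leftmost position whose value is >= v (vals is strictly increasing)
--     lo, hi = 0, len(vals)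
--     while lo < hi:
--         mid = (lo + hi) // 2
--         if vals[mid] < v:
--             lo = mid + 1
--         else:
--             hi = mid
--     return lo
--
--
-- def get_partition_keys(X, selected_cuts):
--     if not X:
--         return []
--     # Per attribute, keep only the strict prefix-maxima of the cut list:
--     # the first cut index matching a value is always one of these, and their
--     # values are strictly increasing, so binary search finds it.
--     stacks = []
--     for attr in (0, 1):
--         cuts = selected_cuts[attr]
--         idxs, vals = [], []
--         for i, c in enumerate(cuts):
--             if not vals or c > vals[-1]:
--                 idxs.append(i)
--                 vals.append(c)
--         stacks.append((idxs, vals, len(cuts)))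
--     result = []
--     for row in X:
--         key = []
--         for attr, (idxs, vals, m) in zip((0, 1), stacks):
--             pos = _bisect_ge(vals, row[attr])
--             key.append(idxs[pos] if pos < len(idxs) else m)
--         result.append(tuple(key))
--     return result
-- ===== Notes on version B (the rewrite author's own statement) =====
-- stated objective: faster
-- what changed: Instead of scanning every cut list linearly for each row, B precomputes per attribute the strict prefix-maxima of the cut list (the only indices a scan can ever return, with strictly increasing values) and answers each row by binary search over that stack.
import Mathlib
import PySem

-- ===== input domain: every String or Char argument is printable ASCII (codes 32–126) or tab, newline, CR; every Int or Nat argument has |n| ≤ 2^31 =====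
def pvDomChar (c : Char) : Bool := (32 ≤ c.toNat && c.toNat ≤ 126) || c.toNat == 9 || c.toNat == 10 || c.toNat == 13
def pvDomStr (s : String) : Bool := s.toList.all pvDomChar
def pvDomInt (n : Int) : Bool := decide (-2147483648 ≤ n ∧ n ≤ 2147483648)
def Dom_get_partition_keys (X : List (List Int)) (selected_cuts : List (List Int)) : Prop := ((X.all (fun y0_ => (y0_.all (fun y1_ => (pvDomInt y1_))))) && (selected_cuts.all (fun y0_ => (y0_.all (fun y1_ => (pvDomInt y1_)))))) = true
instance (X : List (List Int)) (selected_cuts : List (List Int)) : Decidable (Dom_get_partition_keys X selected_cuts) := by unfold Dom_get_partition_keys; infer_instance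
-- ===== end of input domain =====

-- B replaces A's per-row linear scan of each cut list by a per-attribute
-- precomputed strict prefix-maxima stack plus binary search (same return value).

-- ===== PORT A =====
-- the inner 'for i, cut in enumerate(cuts): if val <= cut: … break / else: …' loop
def pvScanAux : List Int → Int → Nat → Option Int
  | [], _, _ => none
  | c :: r, v, i => if v ≤ c then some (Int.ofNat i) else pvScanAux r v (i + 1)

def get_partition_keys (X : List (List Int)) (selected_cuts : List (List Int)) : List (List Int) :=
  X.foldl (fun result row =>
    let key := ([0, 1] : List Int).foldl (fun key attr =>
      let cuts := (PySem.List.pyGet? selected_cuts attr).getD []   -- getD arm unreachable under Pre_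
      let val := (PySem.List.pyGet? row attr).getD 0               -- getD arm unreachable under Pre_
      key ++ [(pvScanAux cuts val 0).getD (Int.ofNat cuts.length)]) []
    result ++ [key]) []

-- ===== PORT B =====
-- '_bisect_ge': 'while lo < hi: mid = (lo + hi) // 2; …'
def pvBis (vals : List Int) (v : Int) (lo hi : Nat) : Nat :=
  if _h : lo < hi then
    if vals.getD ((lo + hi) / 2) 0 < v then pvBis vals v ((lo + hi) / 2 + 1) hi
    else pvBis vals v lo ((lo + hi) / 2)
  else lo
termination_by hi - lo
decreasing_by all_goals omega

-- 'for i, c in enumerate(cuts): if not vals or c > vals[-1]: idxs.append(i); vals.append(c)'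
def pvStack (cuts : List Int) : List Int × List Int :=
  (PySem.List.enumerate cuts).foldl (fun (s : List Int × List Int) p =>
    match s.2.getLast? with
    | none => (s.1 ++ [p.1], s.2 ++ [p.2])
    | some last => if last < p.2 then (s.1 ++ [p.1], s.2 ++ [p.2]) else s) ([], [])

-- 'pos = _bisect_ge(vals, row[attr]); idxs[pos] if pos < len(idxs) else m'
def pvLookup (idxs : List Int) (vals : List Int) (m : Int) (v : Int) : Int :=
  let pos := pvBis vals v 0 vals.length
  if pos < idxs.length then idxs.getD pos 0 else m

def get_partition_keys_alt (X : List (List Int)) (selected_cuts : List (List Int)) : List (List Int) :=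
  if X.isEmpty then []
  else
    let sts := ([0, 1] : List Int).map (fun attr =>
      let cuts := (PySem.List.pyGet? selected_cuts attr).getD []   -- getD arm unreachable under Pre_
      (pvStack cuts, Int.ofNat cuts.length))
    X.map (fun row =>
      (List.zip ([0, 1] : List Int) sts).map (fun p =>
        pvLookup p.2.1.1 p.2.1.2 p.2.2 ((PySem.List.pyGet? row p.1).getD 0)))

-- ===== PRECONDITION & SPEC =====
-- Pre_ excludes exactly the inputs on which A raises IndexError:
-- a nonempty X together with fewer than two cut lists or some row shorter than two.
def Pre_get_partition_keys (X : List (List Int)) (selected_cuts : List (List Int)) : Prop :=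
  X = [] ∨ (2 ≤ selected_cuts.length ∧ ∀ row ∈ X, 2 ≤ row.length)
instance (X : List (List Int)) (selected_cuts : List (List Int)) : Decidable (Pre_get_partition_keys X selected_cuts) := by unfold Pre_get_partition_keys; infer_instance
def pvWitness_get_partition_keys : List (List Int) × List (List Int) := ([[1, 5], [7, -2]], [[0, 3], [4, 1, 4]])

def Spec_get_partition_keys (X : List (List Int)) (selected_cuts : List (List Int)) (out : List (List Int)) : Prop := out = get_partition_keys_alt X selected_cuts
instance (X : List (List Int)) (selected_cuts : List (List Int)) (out : List (List Int)) : Decidable (Spec_get_partition_keys X selected_cuts out) := by unfold Spec_get_partition_keys; infer_instance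

-- ===== CLAIM (what is proved, stated in full; the proofs are below) =====
def Claim_equal_get_partition_keys : Prop := ∀ (X : List (List Int)) (selected_cuts : List (List Int)), Dom_get_partition_keys X selected_cuts → Pre_get_partition_keys X selected_cuts → Spec_get_partition_keys X selected_cuts (get_partition_keys X selected_cuts)

-- ===== LEMMAS AND PROOFS =====

-- A's inner scan is the first index whose cut is ≥ val
theorem pvScanAux_eq (cuts : List Int) (v : Int) (i : Nat) :
    pvScanAux cuts v i = (cuts.findIdx? (fun c => v ≤ c)).map (fun j => Int.ofNat (i + j)) := by
  induction cuts generalizing i with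
  | nil => simp [pvScanAux]
  | cons c r ih =>
    simp only [pvScanAux, List.findIdx?_cons]
    by_cases h : v ≤ c
    · simp [h]
    · simp only [h, decide_false, ih, Option.map_map, Bool.false_eq_true, if_false]
      congr 1
      funext j
      simp only [Function.comp_apply]
      congr 1
      omega

theorem pvFindIdx?_char {α : Type} (xs : List α) (p : α → Bool) (k : Nat)
    (hk : k ≤ xs.length)
    (hlt : ∀ i (h : i < xs.length), i < k → p xs[i] = false)
    (hge : ∀ (h : k < xs.length), p (xs[k]'h) = true) :
    xs.findIdx? p = if k < xs.length then some k else none := by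
  split
  · next h =>
    rw [List.findIdx?_eq_some_iff_getElem]
    exact ⟨h, hge h, fun j hj => by simp [hlt j (by omega) hj]⟩
  · next h =>
    rw [List.findIdx?_eq_none_iff]
    intro x hx
    obtain ⟨i, hi, rfl⟩ := List.mem_iff_getElem.mp hx
    exact hlt i hi (by omega)

theorem pvBis_base (vals : List Int) (v : Int) (lo : Nat) (hlo : lo ≤ vals.length)
    (hbelow : ∀ i (h : i < vals.length), i < lo → ¬ v ≤ vals[i])
    (habove : ∀ i (h : i < vals.length), lo ≤ i → v ≤ vals[i]) :
    lo = (vals.findIdx? (fun c => v ≤ c)).getD vals.length := by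
  rw [pvFindIdx?_char vals _ lo hlo
    (fun i h hik => by simp [hbelow i h hik])
    (fun h => by simp [habove lo h (le_refl _)])]
  split <;> simp_all
  omega

-- loop invariant of the binary search
theorem pvBis_inv (vals : List Int) (v : Int)
    (hsort : vals.Pairwise (· ≤ ·)) :
    ∀ n lo hi, hi - lo ≤ n → lo ≤ hi → hi ≤ vals.length →
    (∀ i (h : i < vals.length), i < lo → ¬ v ≤ vals[i]) →
    (∀ i (h : i < vals.length), hi ≤ i → v ≤ vals[i]) →
    pvBis vals v lo hi = (vals.findIdx? (fun c => v ≤ c)).getD vals.length := by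
  intro n
  induction n with
  | zero =>
    intro lo hi hn hlh hhi hbelow habove
    have : lo = hi := by omega
    subst this
    rw [pvBis]
    simp only [lt_irrefl, dite_false]
    exact pvBis_base vals v lo (by omega) hbelow (fun i h hik => habove i h hik)
  | succ n ih =>
    intro lo hi hn hlh hhi hbelow habove
    rw [pvBis]
    by_cases hlt : lo < hi
    · simp only [hlt, dite_true]
      have hmid : (lo + hi) / 2 < vals.length := by omega
      rw [List.getD_eq_getElem vals 0 hmid]
      by_cases hv : vals[(lo + hi) / 2] < v
      · simp only [hv, if_true]
        refine ih ((lo + hi) / 2 + 1) hi (by omega) (by omega) hhi ?_ habove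
        intro i h hik
        have hle : vals[i] ≤ vals[(lo + hi) / 2] := by
          rcases Nat.lt_or_ge i ((lo + hi) / 2) with hc | hc
          · exact List.pairwise_iff_getElem.mp hsort i _ h hmid hc
          · have : i = (lo + hi) / 2 := by omega
            subst this; exact le_refl _
        omega
      · simp only [hv, if_false]
        refine ih lo ((lo + hi) / 2) (by omega) (by omega) (by omega) hbelow ?_
        intro i h hik
        have hle : vals[(lo + hi) / 2] ≤ vals[i] := by
          rcases Nat.lt_or_ge ((lo + hi) / 2) i with hc | hc
          · exact List.pairwise_iff_getElem.mp hsort _ i hmid h hc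
          · have : i = (lo + hi) / 2 := by omega
            subst this; exact le_refl _
        omega
    · simp only [hlt, dite_false]
      have : lo = hi := by omega
      subst this
      exact pvBis_base vals v lo (by omega) hbelow (fun i h hik => habove i h hik)

theorem pvBis_eq (vals : List Int) (v : Int) (hsort : vals.Pairwise (· ≤ ·)) :
    pvBis vals v 0 vals.length = (vals.findIdx? (fun c => v ≤ c)).getD vals.length :=
  pvBis_inv vals v hsort vals.length 0 vals.length (by omega) (by omega) (le_refl _)
    (fun i h hik => by omega) (fun i h hik => by omega)

theorem pvStack_append (cuts : List Int) (c : Int) :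
    pvStack (cuts ++ [c]) =
      (match (pvStack cuts).2.getLast? with
       | none => ((pvStack cuts).1 ++ [(cuts.length : Int)], (pvStack cuts).2 ++ [c])
       | some last =>
          if last < c then ((pvStack cuts).1 ++ [(cuts.length : Int)], (pvStack cuts).2 ++ [c])
          else pvStack cuts) := by
  unfold pvStack
  rw [PySem.List.enumerate_append]
  simp [PySem.List.enumerate_cons, PySem.List.enumerate_nil]

theorem pvStack_append_none (cuts : List Int) (c : Int)
    (h : (pvStack cuts).2.getLast? = none) :
    pvStack (cuts ++ [c]) = ((pvStack cuts).1 ++ [(cuts.length : Int)], (pvStack cuts).2 ++ [c]) := by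
  rw [pvStack_append, h]

theorem pvStack_append_some (cuts : List Int) (c : Int) (last : Int)
    (h : (pvStack cuts).2.getLast? = some last) :
    pvStack (cuts ++ [c]) =
      (if last < c then ((pvStack cuts).1 ++ [(cuts.length : Int)], (pvStack cuts).2 ++ [c])
       else pvStack cuts) := by
  rw [pvStack_append, h]

-- the stack keeps the strict prefix-maxima: values sorted, every cut bounded by the
-- last kept value, and linear search over the stack = linear search over the cuts
theorem pvStack_inv (cuts : List Int) :
    (pvStack cuts).1.length = (pvStack cuts).2.length ∧
    (pvStack cuts).2.Pairwise (· ≤ ·) ∧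
    (∀ y ∈ (pvStack cuts).2, y ∈ cuts) ∧
    (∀ x ∈ cuts, ∃ l, (pvStack cuts).2.getLast? = some l ∧ x ≤ l) ∧
    (∀ v : Int, ((pvStack cuts).2.findIdx? (fun c => v ≤ c)).map (fun k => (pvStack cuts).1.getD k 0)
        = (cuts.findIdx? (fun c => v ≤ c)).map (fun i => (i : Int))) := by
  induction cuts using List.reverseRecOn with
  | nil => simp [pvStack, PySem.List.enumerate_nil]
  | append_singleton cuts c ih =>
    obtain ⟨ih1, ih2, ih3, ih4, ih5⟩ := ih
    cases hl : (pvStack cuts).2.getLast? with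
    | none =>
      rw [pvStack_append_none cuts c hl]
      have hnil : (pvStack cuts).2 = [] := List.getLast?_eq_none_iff.mp hl
      have hc : cuts = [] := by
        cases cuts with
        | nil => rfl
        | cons a t =>
          obtain ⟨l, hl2, _⟩ := ih4 a (by simp)
          rw [hl] at hl2; cases hl2
      subst hc
      have h1 : (pvStack ([] : List Int)).1 = [] := rfl
      simp only [hnil, h1]
      refine ⟨by simp, by simp, by simp, by simp, ?_⟩
      intro v
      by_cases hv : v ≤ c <;> simp [List.findIdx?_cons, hv]
    | some last =>
      rw [pvStack_append_some cuts c last hl]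
      have hlast_mem : last ∈ (pvStack cuts).2 := List.mem_of_getLast? hl
      by_cases hlc : last < c
      · simp only [hlc, if_true]
        have hyc : ∀ y ∈ (pvStack cuts).2, y ≤ c := by
          intro y hy
          obtain ⟨l, hl2, hyl⟩ := ih4 y (ih3 y hy)
          rw [hl] at hl2; injection hl2 with e; omega
        refine ⟨by simp [ih1], ?_, ?_, ?_, ?_⟩
        · rw [List.pairwise_append]
          exact ⟨ih2, by simp, fun y hy z hz => by simp at hz; subst hz; exact hyc y hy⟩
        · intro y hy
          rcases List.mem_append.mp hy with h | h
          · exact List.mem_append_left _ (ih3 y h)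
          · simp at h; subst h; simp
        · intro x hx
          refine ⟨c, by simp, ?_⟩
          rcases List.mem_append.mp hx with h | h
          · obtain ⟨l, hl2, hxl⟩ := ih4 x h
            rw [hl] at hl2; injection hl2 with e; omega
          · simp at h; omega
        · intro v
          rw [List.findIdx?_append, List.findIdx?_append]
          cases hfv : (pvStack cuts).2.findIdx? (fun c => v ≤ c) with
          | some k =>
            have hk : k < (pvStack cuts).2.length := by
              obtain ⟨h, _, _⟩ := List.findIdx?_eq_some_iff_getElem.mp hfv
              exact h
            cases hfc : cuts.findIdx? (fun c => v ≤ c) with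
            | none => have := ih5 v; rw [hfv, hfc] at this; simp at this
            | some i =>
              have := ih5 v; rw [hfv, hfc] at this
              simp only [Option.map_some, Option.some.injEq] at this
              simp only [Option.some_or, Option.map_some, Option.some.injEq]
              rw [List.getD_append _ _ _ k (by omega)]
              exact this
          | none =>
            have hfc : cuts.findIdx? (fun c => v ≤ c) = none := by
              cases hfc : cuts.findIdx? (fun c => v ≤ c) with
              | none => rfl
              | some i => have := ih5 v; rw [hfv, hfc] at this; simp at this
            rw [hfc]
            by_cases hv : v ≤ c
            · simp [hv, List.findIdx?_cons, ih1, List.getD_append_right]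
            · simp [hv, List.findIdx?_cons]
      · simp only [hlc, if_false]
        refine ⟨ih1, ih2, ?_, ?_, ?_⟩
        · exact fun y hy => List.mem_append_left _ (ih3 y hy)
        · intro x hx
          rcases List.mem_append.mp hx with h | h
          · exact ih4 x h
          · simp at h; subst h; exact ⟨last, hl, by omega⟩
        · intro v
          rw [List.findIdx?_append]
          cases hfv : (pvStack cuts).2.findIdx? (fun c => v ≤ c) with
          | some k =>
            cases hfc : cuts.findIdx? (fun c => v ≤ c) with
            | none => have := ih5 v; rw [hfv, hfc] at this; simp at this
            | some i =>
              have := ih5 v; rw [hfv, hfc] at this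
              simpa using this
          | none =>
            have hfc : cuts.findIdx? (fun c => v ≤ c) = none := by
              cases hfc : cuts.findIdx? (fun c => v ≤ c) with
              | none => rfl
              | some i => have := ih5 v; rw [hfv, hfc] at this; simp at this
            rw [hfc]
            have hvlast : ¬ v ≤ last := by
              have := List.findIdx?_eq_none_iff.mp hfv last hlast_mem
              simpa using this
            have hvc : ¬ v ≤ c := by omega
            simp [hvc, List.findIdx?_cons]

-- per attribute value: B's stack lookup = A's linear scan
theorem pvCore (cuts : List Int) (v : Int) :
    pvLookup (pvStack cuts).1 (pvStack cuts).2 (Int.ofNat cuts.length) v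
      = (pvScanAux cuts v 0).getD (Int.ofNat cuts.length) := by
  obtain ⟨ih1, ih2, _, _, ih5⟩ := pvStack_inv cuts
  have h5 := ih5 v
  unfold pvLookup
  rw [pvBis_eq _ _ ih2, pvScanAux_eq]
  cases hfv : (pvStack cuts).2.findIdx? (fun c => v ≤ c) with
  | some k =>
    have hk : k < (pvStack cuts).2.length := by
      obtain ⟨h, _, _⟩ := List.findIdx?_eq_some_iff_getElem.mp hfv
      exact h
    cases hfc : cuts.findIdx? (fun c => v ≤ c) with
    | none => rw [hfv, hfc] at h5; simp at h5
    | some i =>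
      rw [hfv, hfc] at h5
      simp only [Option.map_some, Option.some.injEq] at h5
      simp only [Option.getD_some, Option.map_some]
      rw [if_pos (by omega)]
      simpa using h5
  | none =>
    have hfc : cuts.findIdx? (fun c => v ≤ c) = none := by
      cases hfc : cuts.findIdx? (fun c => v ≤ c) with
      | none => rfl
      | some i => rw [hfv, hfc] at h5; simp at h5
    simp [ih1, hfc]

theorem pvFoldl_push {α β : Type} (f : α → β) :
    ∀ (l : List α) (acc : List β), l.foldl (fun r x => r ++ [f x]) acc = acc ++ l.map f := by
  intro l
  induction l with
  | nil => simp
  | cons x xs ih => intro acc; simp [List.foldl, ih]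

-- ===== VERDICT (by name: the statement is the Claim_ definition above) =====
theorem get_partition_keys_spec : Claim_equal_get_partition_keys := by
  intro X selected_cuts _ _
  unfold Spec_get_partition_keys get_partition_keys get_partition_keys_alt
  cases X with
  | nil => rfl
  | cons r rs =>
    simp only [List.isEmpty_cons, Bool.false_eq_true, if_false]
    rw [pvFoldl_push]
    simp only [List.nil_append]
    apply List.map_congr_left
    intro row _
    simp only [List.foldl, List.map, List.zip, List.zipWith, List.nil_append, List.append_nil]
    rw [pvCore, pvCore]
    rfl
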